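-- pv_equiv track=rewrite | github.com/CastroMaster10/Genetic_Algorithm_TaskSequencing | modelo_algoritmoGenetico.py | evaluarFuncionFitness
-- ===== SOURCE A (Python) =====
-- def ordenar_poblacion(poblacion):
--     return {k: v for k, v in sorted(poblacion.items(), key=lambda item: item[1],reverse=True)}
--
-- def evaluarFuncionFitness(generacion_poblacion,longitud_individuos,ti,di,hi,ci):
--     poblacion = {}
--     for individuo in generacion_poblacion:
--         xi = 0 #tiempo total de realizacion de tareas
--         f_o = 0 #funcion objetivo
--         for i in range(0,longitud_individuos,3):
--             n_tarea = int(individuo[i:i+3],2)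
--             ai = max(0,di[n_tarea] - xi - ti[n_tarea]) #tiempo de retencion
--             bi = max(0,xi + ti[n_tarea] - di[n_tarea]) #tiempo de penalizacion
--             f_o += ai * hi[n_tarea]  + bi * ci[n_tarea]
--             xi += ti[n_tarea]
--
--         poblacion[individuo] = f_o
--
--
--     return ordenar_poblacion(poblacion)
-- ===== SOURCE B (Python) =====
-- def evaluarFuncionFitness(generacion_poblacion, longitud_individuos, ti, di, hi, ci):
--     # decode the chromosome, then walk the schedule BACK-TO-FRONT from the total
--     # completion time with a decrementing clock; same descending stable sort.
--     def fitness(individuo):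
--         tasks = [int(individuo[i:i+3], 2) for i in range(0, longitud_individuos, 3)]
--         c = sum(ti[t] for t in tasks)   # completion time of the last task
--         f_o = 0
--         for t in reversed(tasks):
--             f_o += max(0, di[t] - c) * hi[t] + max(0, c - di[t]) * ci[t]
--             c -= ti[t]
--         return f_o
--     poblacion = {individuo: fitness(individuo) for individuo in generacion_poblacion}
--     return dict(sorted(poblacion.items(), key=lambda kv: kv[1], reverse=True))
-- ===== Notes on version B (the rewrite author's own statement) =====
-- stated objective: alternative
-- what changed: A scans each chromosome front-to-back carrying an incrementing elapsed-time accumulator; B decodes the task list, computes the total completion time once, and then traverses the schedule back-to-front with a decrementing clock (a reversed traversal whose correctness needs that order does not matter); the dict build and descending stable sort are unchanged.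
import Mathlib
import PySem

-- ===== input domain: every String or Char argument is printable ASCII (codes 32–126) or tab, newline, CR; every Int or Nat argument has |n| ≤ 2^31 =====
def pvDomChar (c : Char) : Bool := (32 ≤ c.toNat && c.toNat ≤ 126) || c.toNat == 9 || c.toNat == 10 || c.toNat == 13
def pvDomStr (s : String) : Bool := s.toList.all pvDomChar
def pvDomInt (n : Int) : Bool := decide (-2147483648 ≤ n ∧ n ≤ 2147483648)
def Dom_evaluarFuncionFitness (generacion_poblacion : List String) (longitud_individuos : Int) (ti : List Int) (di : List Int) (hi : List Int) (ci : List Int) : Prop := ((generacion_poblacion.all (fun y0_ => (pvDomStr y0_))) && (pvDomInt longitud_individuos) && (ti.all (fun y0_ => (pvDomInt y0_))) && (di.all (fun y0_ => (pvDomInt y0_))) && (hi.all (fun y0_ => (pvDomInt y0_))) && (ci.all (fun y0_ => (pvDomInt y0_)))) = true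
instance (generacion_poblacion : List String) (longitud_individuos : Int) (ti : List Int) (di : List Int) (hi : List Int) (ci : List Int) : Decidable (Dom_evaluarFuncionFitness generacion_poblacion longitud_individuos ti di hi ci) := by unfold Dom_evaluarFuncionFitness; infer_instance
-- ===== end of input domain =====

-- B replaces A's front-to-back elapsed-time scan by a back-to-front traversal from the total completion time with a decrementing clock (same sort); objective: alternative, same cost.

-- ===== PORT A =====
-- int(individuo[i:i+3], 2): exact via PySem.Int.ofCharsBase? on the slice; totalised with .getD 0
-- (Pre_ guarantees the parse succeeds) and list indexing via PySem.List.pyGetD (Pre_ guarantees in range).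
def evaluarFuncionFitness (generacion_poblacion : List String) (longitud_individuos : Int) (ti : List Int) (di : List Int) (hi : List Int) (ci : List Int) : List (String × Int) :=
  let poblacion : PySem.Dict String Int :=
    generacion_poblacion.foldl (fun pob individuo =>
      let st :=
        (PySem.List.pyRange 0 longitud_individuos 3).foldl (fun (st : Int × Int) i =>
          let n_tarea := (PySem.Int.ofCharsBase? (PySem.List.slice individuo.toList (some i) (some (i + 3))) 2).getD 0
          let ai := max 0 (PySem.List.pyGetD di n_tarea 0 - st.1 - PySem.List.pyGetD ti n_tarea 0)
          let bi := max 0 (st.1 + PySem.List.pyGetD ti n_tarea 0 - PySem.List.pyGetD di n_tarea 0)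
          (st.1 + PySem.List.pyGetD ti n_tarea 0,
           st.2 + (ai * PySem.List.pyGetD hi n_tarea 0 + bi * PySem.List.pyGetD ci n_tarea 0)))
        ((0 : Int), (0 : Int))
      pob.insert individuo st.2) PySem.Dict.empty
  -- ordenar_poblacion: dict rebuilt from items sorted by value, descending (stable)
  PySem.List.sorted poblacion.items (fun kv => kv.2) true

-- ===== PORT B =====
def evaluarFuncionFitness_alt (generacion_poblacion : List String) (longitud_individuos : Int) (ti : List Int) (di : List Int) (hi : List Int) (ci : List Int) : List (String × Int) :=
  let fitness : String → Int := fun individuo =>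
    let tasks : List Int :=
      (PySem.List.pyRange 0 longitud_individuos 3).map (fun i =>
        (PySem.Int.ofCharsBase? (PySem.List.slice individuo.toList (some i) (some (i + 3))) 2).getD 0)
    let c0 : Int := tasks.foldl (fun s t => s + PySem.List.pyGetD ti t 0) 0
    (tasks.reverse.foldl (fun (st : Int × Int) t =>
        (st.1 - PySem.List.pyGetD ti t 0,
         st.2 + (max 0 (PySem.List.pyGetD di t 0 - st.1) * PySem.List.pyGetD hi t 0 +
                 max 0 (st.1 - PySem.List.pyGetD di t 0) * PySem.List.pyGetD ci t 0)))
      (c0, (0 : Int))).2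
  let poblacion : PySem.Dict String Int :=
    generacion_poblacion.foldl (fun pob individuo => pob.insert individuo (fitness individuo)) PySem.Dict.empty
  PySem.List.sorted poblacion.items (fun kv => kv.2) true

-- ===== PRECONDITION & SPEC =====
-- Pre_: every 3-bit chunk of every individual parses under Python's int(·, 2) and the resulting
-- task number is a valid (possibly negative) Python index into ti, di, hi and ci — exactly the
-- inputs on which A returns without a ValueError/IndexError.
-- The first conjunct is implied by the second (a parsable chunk needs its start index < the
-- string length, so longitud_individuos ≤ len+3 whenever all chunks parse); it is there only so
-- deciding Pre_ short-circuits instead of materializing a huge range — it excludes nothing.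
def Pre_evaluarFuncionFitness (generacion_poblacion : List String) (longitud_individuos : Int) (ti : List Int) (di : List Int) (hi : List Int) (ci : List Int) : Prop :=
  (∀ individuo ∈ generacion_poblacion, longitud_individuos ≤ (individuo.toList.length : Int) + 3) ∧
  (generacion_poblacion.all (fun individuo =>
    (PySem.List.pyRange 0 longitud_individuos 3).all (fun i =>
      match PySem.Int.ofCharsBase? (PySem.List.slice individuo.toList (some i) (some (i + 3))) 2 with
      | none => false
      | some n =>
        (-(ti.length : Int) ≤ n && n < (ti.length : Int)) &&
        (-(di.length : Int) ≤ n && n < (di.length : Int)) &&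
        (-(hi.length : Int) ≤ n && n < (hi.length : Int)) &&
        (-(ci.length : Int) ≤ n && n < (ci.length : Int))))) = true
instance (generacion_poblacion : List String) (longitud_individuos : Int) (ti : List Int) (di : List Int) (hi : List Int) (ci : List Int) : Decidable (Pre_evaluarFuncionFitness generacion_poblacion longitud_individuos ti di hi ci) := by unfold Pre_evaluarFuncionFitness; infer_instance

def pvWitness_evaluarFuncionFitness : List String × Int × List Int × List Int × List Int × List Int :=
  (["011010", "000001"], 6, [2, 1, 3, 4], [1, 2, 3, 4], [1, 1, 1, 1], [2, 2, 2, 2])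

def Spec_evaluarFuncionFitness (generacion_poblacion : List String) (longitud_individuos : Int) (ti : List Int) (di : List Int) (hi : List Int) (ci : List Int) (out : List (String × Int)) : Prop := out = evaluarFuncionFitness_alt generacion_poblacion longitud_individuos ti di hi ci
instance (generacion_poblacion : List String) (longitud_individuos : Int) (ti : List Int) (di : List Int) (hi : List Int) (ci : List Int) (out : List (String × Int)) : Decidable (Spec_evaluarFuncionFitness generacion_poblacion longitud_individuos ti di hi ci out) := by unfold Spec_evaluarFuncionFitness; infer_instance

-- ===== CLAIM (what is proved, stated in full; the proofs are below) =====
def Claim_equal_evaluarFuncionFitness : Prop := ∀ (generacion_poblacion : List String) (longitud_individuos : Int) (ti : List Int) (di : List Int) (hi : List Int) (ci : List Int), Dom_evaluarFuncionFitness generacion_poblacion longitud_individuos ti di hi ci → Pre_evaluarFuncionFitness generacion_poblacion longitud_individuos ti di hi ci → Spec_evaluarFuncionFitness generacion_poblacion longitud_individuos ti di hi ci (evaluarFuncionFitness generacion_poblacion longitud_individuos ti di hi ci)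

-- ===== LEMMAS AND PROOFS =====

-- A's forward accumulation over a task list, as structural recursion
def pvSumC (ti di hi ci : List Int) : List Int → Int → Int
  | [], _ => 0
  | t :: ts, x =>
    (max 0 (PySem.List.pyGetD di t 0 - x - PySem.List.pyGetD ti t 0) * PySem.List.pyGetD hi t 0 +
     max 0 (x + PySem.List.pyGetD ti t 0 - PySem.List.pyGetD di t 0) * PySem.List.pyGetD ci t 0) +
    pvSumC ti di hi ci ts (x + PySem.List.pyGetD ti t 0)

-- total service time of a task list
def pvS (ti : List Int) : List Int → Int
  | [] => 0
  | t :: ts => PySem.List.pyGetD ti t 0 + pvS ti ts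

-- B's decrementing-clock pass, as structural recursion
def pvRev (ti di hi ci : List Int) : List Int → Int → Int
  | [], _ => 0
  | t :: ts, c =>
    (max 0 (PySem.List.pyGetD di t 0 - c) * PySem.List.pyGetD hi t 0 +
     max 0 (c - PySem.List.pyGetD di t 0) * PySem.List.pyGetD ci t 0) +
    pvRev ti di hi ci ts (c - PySem.List.pyGetD ti t 0)

theorem pvFoldA_eq (ti di hi ci : List Int) (g : Int → Int) :
    ∀ (l : List Int) (x s : Int),
      (l.foldl (fun (st : Int × Int) i =>
        (st.1 + PySem.List.pyGetD ti (g i) 0,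
         st.2 + (max 0 (PySem.List.pyGetD di (g i) 0 - st.1 - PySem.List.pyGetD ti (g i) 0) * PySem.List.pyGetD hi (g i) 0 +
                 max 0 (st.1 + PySem.List.pyGetD ti (g i) 0 - PySem.List.pyGetD di (g i) 0) * PySem.List.pyGetD ci (g i) 0)))
        (x, s)).2 = s + pvSumC ti di hi ci (l.map g) x := by
  intro l
  induction l with
  | nil => intro x s; simp [pvSumC]
  | cons i l ih => intro x s; simp only [List.foldl_cons, List.map_cons, pvSumC, ih]; ring

theorem pvFoldSum_eq (ti : List Int) :
    ∀ (ts : List Int) (s : Int),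
      ts.foldl (fun s t => s + PySem.List.pyGetD ti t 0) s = s + pvS ti ts := by
  intro ts
  induction ts with
  | nil => intro s; simp [pvS]
  | cons t ts ih => intro s; simp only [List.foldl_cons, pvS, ih]; ring

theorem pvFoldRev_eq (ti di hi ci : List Int) :
    ∀ (ts : List Int) (c s : Int),
      (ts.foldl (fun (st : Int × Int) t =>
        (st.1 - PySem.List.pyGetD ti t 0,
         st.2 + (max 0 (PySem.List.pyGetD di t 0 - st.1) * PySem.List.pyGetD hi t 0 +
                 max 0 (st.1 - PySem.List.pyGetD di t 0) * PySem.List.pyGetD ci t 0)))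
        (c, s)).2 = s + pvRev ti di hi ci ts c := by
  intro ts
  induction ts with
  | nil => intro c s; simp [pvRev]
  | cons t ts ih => intro c s; simp only [List.foldl_cons, pvRev, ih]; ring

theorem pvRev_append (ti di hi ci : List Int) :
    ∀ (a b : List Int) (c : Int),
      pvRev ti di hi ci (a ++ b) c = pvRev ti di hi ci a c + pvRev ti di hi ci b (c - pvS ti a) := by
  intro a
  induction a with
  | nil => intro b c; simp [pvRev, pvS]
  | cons t ts ih =>
    intro b c
    simp only [List.cons_append, pvRev, pvS, ih]
    have : c - PySem.List.pyGetD ti t 0 - pvS ti ts = c - (PySem.List.pyGetD ti t 0 + pvS ti ts) := by ring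
    rw [this]; ring

theorem pvS_reverse (ti : List Int) : ∀ (ts : List Int), pvS ti ts.reverse = pvS ti ts := by
  intro ts
  induction ts with
  | nil => rfl
  | cons t ts ih =>
    have happ : ∀ (a b : List Int), pvS ti (a ++ b) = pvS ti a + pvS ti b := by
      intro a
      induction a with
      | nil => intro b; simp [pvS]
      | cons u us ihu => intro b; simp only [List.cons_append, pvS, ihu]; ring
    simp only [List.reverse_cons, happ, pvS, ih]; ring

-- the reverse decrementing pass from the total equals the forward accumulation
theorem pvRev_reverse_eq (ti di hi ci : List Int) :
    ∀ (ts : List Int) (x : Int),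
      pvRev ti di hi ci ts.reverse (x + pvS ti ts) = pvSumC ti di hi ci ts x := by
  intro ts
  induction ts with
  | nil => intro x; simp [pvRev, pvSumC]
  | cons t ts ih =>
    intro x
    simp only [List.reverse_cons, pvRev_append, pvS_reverse, pvSumC, pvRev, pvS]
    have h1 : x + (PySem.List.pyGetD ti t 0 + pvS ti ts) = (x + PySem.List.pyGetD ti t 0) + pvS ti ts := by ring
    rw [h1, ih]
    have h2 : x + PySem.List.pyGetD ti t 0 + pvS ti ts - pvS ti ts = x + PySem.List.pyGetD ti t 0 := by ring
    rw [h2]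
    have h3 : PySem.List.pyGetD di t 0 - (x + PySem.List.pyGetD ti t 0) = PySem.List.pyGetD di t 0 - x - PySem.List.pyGetD ti t 0 := by ring
    rw [h3]
    ring

-- the two per-individual fitness computations agree
theorem pvFit_eq (L : Int) (ti di hi ci : List Int) (individuo : String) :
    ((PySem.List.pyRange 0 L 3).foldl (fun (st : Int × Int) i =>
        let n_tarea := (PySem.Int.ofCharsBase? (PySem.List.slice individuo.toList (some i) (some (i + 3))) 2).getD 0
        let ai := max 0 (PySem.List.pyGetD di n_tarea 0 - st.1 - PySem.List.pyGetD ti n_tarea 0)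
        let bi := max 0 (st.1 + PySem.List.pyGetD ti n_tarea 0 - PySem.List.pyGetD di n_tarea 0)
        (st.1 + PySem.List.pyGetD ti n_tarea 0,
         st.2 + (ai * PySem.List.pyGetD hi n_tarea 0 + bi * PySem.List.pyGetD ci n_tarea 0)))
      ((0 : Int), (0 : Int))).2
    = (let tasks : List Int :=
        (PySem.List.pyRange 0 L 3).map (fun i =>
          (PySem.Int.ofCharsBase? (PySem.List.slice individuo.toList (some i) (some (i + 3))) 2).getD 0)
       let c0 : Int := tasks.foldl (fun s t => s + PySem.List.pyGetD ti t 0) 0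
       (tasks.reverse.foldl (fun (st : Int × Int) t =>
          (st.1 - PySem.List.pyGetD ti t 0,
           st.2 + (max 0 (PySem.List.pyGetD di t 0 - st.1) * PySem.List.pyGetD hi t 0 +
                   max 0 (st.1 - PySem.List.pyGetD di t 0) * PySem.List.pyGetD ci t 0)))
        (c0, (0 : Int))).2) := by
  simp only [pvFoldRev_eq, pvFoldSum_eq, zero_add]
  rw [pvFoldA_eq ti di hi ci
    (fun i => (PySem.Int.ofCharsBase? (PySem.List.slice individuo.toList (some i) (some (i + 3))) 2).getD 0),
    zero_add]
  have := pvRev_reverse_eq ti di hi ci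
    ((PySem.List.pyRange 0 L 3).map (fun i =>
      (PySem.Int.ofCharsBase? (PySem.List.slice individuo.toList (some i) (some (i + 3))) 2).getD 0)) 0
  rw [zero_add] at this
  rw [this]

-- ===== VERDICT (by name: the statement is the Claim_ definition above) =====
theorem evaluarFuncionFitness_spec : Claim_equal_evaluarFuncionFitness := by
  intro gp L ti di hi ci _ _
  unfold Spec_evaluarFuncionFitness evaluarFuncionFitness evaluarFuncionFitness_alt
  simp only [pvFit_eq]
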